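-- pv_equiv track=rewrite | github.com/inwpuun/band-protocol | superman-chicken-rescue/problem2.py | max_chickens_rescued
-- ===== SOURCE A (Python) =====
-- def max_chickens_rescued(n, k, positions):
--     result = 0
--     start_point = 0
--
--     for end_point in range(n):
--         # While the roof's range is exceeded, move the start pointer
--         while positions[end_point] - positions[start_point] >= k:
--             start_point += 1
--
--         # Update the result
--         result = max(result, end_point - start_point + 1)
--
--     return result
-- ===== SOURCE B (Python) =====
-- def max_chickens_rescued(n, k, positions):
--     # Per-end binary search for the window start, instead of a maintained
--     # sliding start pointer: start = first index j in [0, end] with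
--     # positions[j] > positions[end] - k (bisect_right, written by hand).
--     result = 0
--     for end in range(n):
--         target = positions[end] - k
--         lo, hi = 0, end + 1
--         while lo < hi:
--             mid = (lo + hi) // 2
--             if target < positions[mid]:
--                 hi = mid
--             else:
--                 lo = mid + 1
--         result = max(result, end - lo + 1)
--     return result
-- ===== Notes on version B (the rewrite author's own statement) =====
-- stated objective: alternative
-- what changed: Replaced the maintained sliding start pointer by an independent hand-written bisect_right binary search over positions[0:end+1] for each end index.
-- outside the precondition, e.g. on max_chickens_rescued(3, 2, [1, 10, 2]): A returns 2, B returns 3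
import Mathlib
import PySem

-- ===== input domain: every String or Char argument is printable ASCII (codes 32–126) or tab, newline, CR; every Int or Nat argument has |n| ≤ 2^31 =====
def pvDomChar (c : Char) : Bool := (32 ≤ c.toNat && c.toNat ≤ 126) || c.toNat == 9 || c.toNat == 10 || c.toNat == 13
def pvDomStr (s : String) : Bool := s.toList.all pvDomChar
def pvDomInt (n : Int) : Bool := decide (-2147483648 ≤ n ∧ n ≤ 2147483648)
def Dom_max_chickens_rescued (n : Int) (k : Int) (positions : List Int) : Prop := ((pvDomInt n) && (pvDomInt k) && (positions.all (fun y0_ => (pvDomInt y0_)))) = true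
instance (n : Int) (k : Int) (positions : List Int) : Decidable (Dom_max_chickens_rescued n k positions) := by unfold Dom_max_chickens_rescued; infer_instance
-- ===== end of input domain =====

-- B replaces A's sliding start pointer by a per-end binary search (hand-written bisect_right)
-- over the sorted prefix; same result, a genuinely different decomposition (not faster).


-- ===== PORT A =====
-- inner 'while positions[end_point] - positions[start_point] >= k: start_point += 1',
-- fuel-bounded; an out-of-range index is Python's IndexError (excluded by Pre_), the port just stops there.
def pyWhileA (positions : List Int) (ep k : Int) : Nat → Int → Int
  | 0, start => start
  | fuel+1, start =>
    match PySem.List.pyGet? positions ep, PySem.List.pyGet? positions start with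
    | some pe, some ps =>
      if pe - ps ≥ k then pyWhileA positions ep k fuel (start + 1) else start
    | _, _ => start

def max_chickens_rescued (n : Int) (k : Int) (positions : List Int) : Int :=
  ((PySem.List.pyRange 0 n 1).foldl
    (fun st ep =>
      let start := pyWhileA positions ep k (positions.length + 1) st.2
      (max st.1 (ep - start + 1), start))
    ((0 : Int), (0 : Int))).1

-- ===== PORT B =====
-- hand-written bisect_right of Source B; every index probed at a call site inside Pre_ is in range,
-- so List.getD is exact there.
def bisectB (positions : List Int) (target : Int) (lo hi : Nat) : Nat :=
  if lo < hi then
    let mid := (lo + hi) / 2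
    if target < positions.getD mid 0 then bisectB positions target lo mid
    else bisectB positions target (mid + 1) hi
  else lo
termination_by hi - lo
decreasing_by all_goals omega

def max_chickens_rescued_alt (n : Int) (k : Int) (positions : List Int) : Int :=
  (PySem.List.pyRange 0 n 1).foldl
    (fun result ep =>
      match PySem.List.pyGet? positions ep with
      | some pe => max result (ep - (bisectB positions (pe - k) 0 (ep.toNat + 1) : Nat) + 1)
      | none => result)
    0

-- ===== PRECONDITION & SPEC =====
-- Pre_ excludes: n > len(positions), and k ≤ 0 inputs whose list holds no element above
-- positions[n-1] - k — on both A raises IndexError; and inputs whose first n positions are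
-- unsorted, where A's pointer-walk value is an accident of the implementation (the task is
-- stated on a sorted line of positions).  All k ≤ 0 inputs on which A returns are admitted.
def Pre_max_chickens_rescued (n : Int) (k : Int) (positions : List Int) : Prop :=
  n ≤ 0 ∨ (n ≤ (positions.length : Int) ∧ (positions.take n.toNat).Pairwise (· ≤ ·) ∧
    (1 ≤ k ∨ ∃ x ∈ positions, positions.getD (n.toNat - 1) 0 - k < x))
instance (n : Int) (k : Int) (positions : List Int) : Decidable (Pre_max_chickens_rescued n k positions) := by unfold Pre_max_chickens_rescued; infer_instance

def pvWitness_max_chickens_rescued : Int × Int × List Int := (3, 2, [1, 2, 4])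

def Spec_max_chickens_rescued (n : Int) (k : Int) (positions : List Int) (out : Int) : Prop := out = max_chickens_rescued_alt n k positions
instance (n : Int) (k : Int) (positions : List Int) (out : Int) : Decidable (Spec_max_chickens_rescued n k positions out) := by unfold Spec_max_chickens_rescued; infer_instance

-- ===== CLAIM (what is proved, stated in full; the proofs are below) =====
def Claim_equal_max_chickens_rescued : Prop := ∀ (n : Int) (k : Int) (positions : List Int), Dom_max_chickens_rescued n k positions → Pre_max_chickens_rescued n k positions → Spec_max_chickens_rescued n k positions (max_chickens_rescued n k positions)

-- ===== LEMMAS AND PROOFS =====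

-- least j with j = len ∨ positions[e] - k < positions[j] (always exists at j = len)
def stopIdx (pos : List Int) (k : Int) (e : Nat) : Nat :=
  Nat.find (p := fun j => j = pos.length ∨ pos.getD e 0 - k < pos.getD j 0) ⟨pos.length, Or.inl rfl⟩

theorem stopIdx_min (pos : List Int) (k : Int) (e j : Nat) (hj : j < stopIdx pos k e) :
    j ≠ pos.length ∧ pos.getD j 0 ≤ pos.getD e 0 - k := by
  have := Nat.find_min (p := fun j => j = pos.length ∨ pos.getD e 0 - k < pos.getD j 0)
    ⟨pos.length, Or.inl rfl⟩ hj
  push Not at this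
  exact ⟨this.1, by omega⟩

theorem stopIdx_spec (pos : List Int) (k : Int) (e : Nat) :
    stopIdx pos k e = pos.length ∨ pos.getD e 0 - k < pos.getD (stopIdx pos k e) 0 :=
  Nat.find_spec (p := fun j => j = pos.length ∨ pos.getD e 0 - k < pos.getD j 0)
    ⟨pos.length, Or.inl rfl⟩

theorem stopIdx_le_of (pos : List Int) (k : Int) (e j : Nat)
    (h : j = pos.length ∨ pos.getD e 0 - k < pos.getD j 0) : stopIdx pos k e ≤ j :=
  Nat.find_le h

theorem getD_mono (pos : List Int) (m : Nat) (hm : m ≤ pos.length)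
    (hs : (pos.take m).Pairwise (· ≤ ·)) (a b : Nat) (hab : a ≤ b) (hb : b < m) :
    pos.getD a 0 ≤ pos.getD b 0 := by
  rcases Nat.lt_or_ge a b with h | h
  · have hlen : (pos.take m).length = m := by simp [List.length_take]; omega
    have := (List.pairwise_iff_getElem.1 hs) a b (by omega) (by omega) h
    simpa [List.getElem_take, List.getD_eq_getElem, hlen, Nat.lt_of_lt_of_le hb hm,
      Nat.lt_of_lt_of_le (Nat.lt_of_le_of_lt hab hb) hm] using this
  · have : a = b := by omega
    subst this; exact le_refl _

theorem stopIdx_mono (pos : List Int) (k : Int) (m : Nat) (hm : m ≤ pos.length)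
    (hs : (pos.take m).Pairwise (· ≤ ·)) (e1 e2 : Nat) (h12 : e1 ≤ e2) (h2 : e2 < m) :
    stopIdx pos k e1 ≤ stopIdx pos k e2 := by
  refine (Nat.le_find_iff _ _).2 ?_
  intro j hj
  have h := stopIdx_min pos k e1 j hj
  have := getD_mono pos m hm hs e1 e2 h12 h2
  push Not
  exact ⟨h.1, by omega⟩

theorem whileA_eq (pos : List Int) (k : Int) (e : Nat) (he : e < pos.length)
    (hstop : stopIdx pos k e < pos.length) :
    ∀ (fuel s : Nat), s ≤ stopIdx pos k e → stopIdx pos k e - s < fuel →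
      pyWhileA pos (e : Int) k fuel (s : Int) = (stopIdx pos k e : Int) := by
  intro fuel
  induction fuel with
  | zero => intro s _ h; omega
  | succ f ih =>
    intro s hs hfuel
    have hse : s < pos.length := by omega
    have hge : PySem.List.pyGet? pos (e : Int) = some (pos.getD e 0) := by
      rw [PySem.List.pyGet?_natCast]; simp [he]
    have hgs : PySem.List.pyGet? pos (s : Int) = some (pos.getD s 0) := by
      rw [PySem.List.pyGet?_natCast]; simp [hse]
    rcases Nat.lt_or_ge s (stopIdx pos k e) with hlt | hge'
    · have hcond : pos.getD e 0 - pos.getD s 0 ≥ k := by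
        have := (stopIdx_min pos k e s hlt).2; omega
      have hone : ((s : Int) + 1) = ((s + 1 : Nat) : Int) := by push_cast; ring
      rw [pyWhileA, hge, hgs]
      show (if pos.getD e 0 - pos.getD s 0 ≥ k then pyWhileA pos (e : Int) k f ((s : Int) + 1)
            else (s : Int)) = (stopIdx pos k e : Int)
      rw [if_pos hcond, hone]
      exact ih (s + 1) (by omega) (by omega)
    · have hseq : s = stopIdx pos k e := by omega
      have hcond : ¬ (pos.getD e 0 - pos.getD s 0 ≥ k) := by
        rcases stopIdx_spec pos k e with h | h
        · omega
        · rw [hseq]; omega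
      rw [pyWhileA, hge, hgs]
      show (if pos.getD e 0 - pos.getD s 0 ≥ k then pyWhileA pos (e : Int) k f ((s : Int) + 1)
            else (s : Int)) = (stopIdx pos k e : Int)
      rw [if_neg hcond, hseq]

theorem bisectB_eq (pos : List Int) (k : Int) (m : Nat) (hm : m ≤ pos.length)
    (hs : (pos.take m).Pairwise (· ≤ ·)) (e : Nat) (he : e < m) :
    ∀ (d lo hi : Nat), hi - lo ≤ d → lo ≤ min (stopIdx pos k e) (e + 1) →
      min (stopIdx pos k e) (e + 1) ≤ hi → hi ≤ e + 1 →
      bisectB pos (pos.getD e 0 - k) lo hi = min (stopIdx pos k e) (e + 1) := by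
  intro d
  induction d with
  | zero =>
    intro lo hi hd h1 h2 h3
    rw [bisectB, if_neg (by omega)]
    omega
  | succ d ih =>
    intro lo hi hd h1 h2 h3
    by_cases hlh : lo < hi
    · rw [bisectB, if_pos hlh]
      set mid := (lo + hi) / 2 with hmid
      have hmlt : mid < hi := by omega
      have hme : mid ≤ e := by omega
      by_cases hc : pos.getD e 0 - k < pos.getD mid 0
      · rw [if_pos hc]
        have hstople : stopIdx pos k e ≤ mid := stopIdx_le_of pos k e mid (Or.inr hc)
        exact ih lo mid (by omega) h1 (by omega) (by omega)
      · rw [if_neg hc]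
        have hmidlt : mid < stopIdx pos k e := by
          by_contra hcon
          have hsl : stopIdx pos k e ≤ mid := by omega
          rcases stopIdx_spec pos k e with h | h
          · omega
          · have hmono := getD_mono pos m hm hs (stopIdx pos k e) mid hsl (by omega)
            omega
        exact ih (mid + 1) hi (by omega) (by omega) h2 h3
    · rw [bisectB, if_neg hlh]; omega

theorem loop_eq (pos : List Int) (n k : Int) (hn : n ≤ (pos.length : Int))
    (hs : (pos.take n.toNat).Pairwise (· ≤ ·))
    (hstopall : ∀ e < n.toNat, stopIdx pos k e < pos.length) :
    ∀ (c e j : Nat) (r : Int), n.toNat - e ≤ c → (e : Int) ≤ n → 0 ≤ r →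
      (∀ e' : Nat, e ≤ e' → e' < n.toNat → j ≤ stopIdx pos k e') →
      ((PySem.List.pyRange (e : Int) n 1).foldl
        (fun st ep =>
          let start := pyWhileA pos ep k (pos.length + 1) st.2
          (max st.1 (ep - start + 1), start))
        (r, (j : Int))).1
      = (PySem.List.pyRange (e : Int) n 1).foldl
        (fun result ep =>
          match PySem.List.pyGet? pos ep with
          | some pe => max result (ep - (bisectB pos (pe - k) 0 (ep.toNat + 1) : Nat) + 1)
          | none => result)
        r := by
  set m := n.toNat with hmdef
  have hm : m ≤ pos.length := by omega
  intro c
  induction c with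
  | zero =>
    intro e j r hc hen hr hinv
    rw [PySem.List.pyRange_one_eq_nil (by omega)]
    simp
  | succ c ih =>
    intro e j r hc hen hr hinv
    rcases lt_or_ge (e : Int) n with hlt | hge
    · have hem : e < m := by omega
      have hstop := hstopall e hem
      rw [PySem.List.pyRange_one_cons hlt]
      simp only [List.foldl_cons]
      -- A's step
      have hA : pyWhileA pos (e : Int) k (pos.length + 1) (j : Int)
          = (stopIdx pos k e : Int) := by
        apply whileA_eq pos k e (by omega) hstop
        · exact hinv e (le_refl _) hem
        · omega
      -- B's step
      have hge' : PySem.List.pyGet? pos (e : Int) = some (pos.getD e 0) := by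
        rw [PySem.List.pyGet?_natCast]
        simp [Nat.lt_of_lt_of_le hem hm]
      have hB : bisectB pos (pos.getD e 0 - k) 0 ((e : Int).toNat + 1)
          = min (stopIdx pos k e) (e + 1) := by
        rw [Int.toNat_natCast]
        exact bisectB_eq pos k m hm hs e hem (e + 1) 0 (e + 1) (by omega) (by omega)
          (by omega) (by omega)
      -- both steps produce the same running max
      have hsame : max r ((e : Int) - (stopIdx pos k e : Int) + 1)
          = max r ((e : Int) - (min (stopIdx pos k e) (e + 1) : Nat) + 1) := by
        rcases Nat.lt_or_ge (stopIdx pos k e) (e + 1) with hle | hgt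
        · rw [Nat.min_eq_left (by omega)]
        · rw [Nat.min_eq_right hgt]
          have h1 : (e : Int) - (stopIdx pos k e : Int) + 1 ≤ 0 := by
            have : ((e + 1 : Nat) : Int) ≤ (stopIdx pos k e : Int) := by exact_mod_cast hgt
            push_cast at this
            omega
          have h2 : (e : Int) - ((e + 1 : Nat) : Int) + 1 = 0 := by push_cast; ring
          rw [h2, max_eq_left hr]
          exact max_eq_left (le_trans h1 hr)
      have hcast : (e : Int) + 1 = ((e + 1 : Nat) : Int) := by push_cast; ring
      simp only [hA, hge', hB, hcast, hsame]
      apply ih (e + 1) (stopIdx pos k e)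
      · omega
      · omega
      · exact le_trans hr (le_max_left _ _)
      · intro e' he' hen'
        exact stopIdx_mono pos k m hm hs e e' (by omega) hen'
    · rw [PySem.List.pyRange_one_eq_nil (by omega)]
      simp

-- ===== VERDICT (by name: the statement is the Claim_ definition above) =====
theorem max_chickens_rescued_spec : Claim_equal_max_chickens_rescued := by
  intro n k pos _ hpre
  unfold Spec_max_chickens_rescued max_chickens_rescued max_chickens_rescued_alt
  by_cases hn0 : n ≤ 0
  · rw [PySem.List.pyRange_one_eq_nil (by omega)]
    simp
  · rcases hpre with hn | ⟨hlen, hs, hkx⟩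
    · omega
    · have hm : n.toNat ≤ pos.length := by omega
      have hstopall : ∀ e < n.toNat, stopIdx pos k e < pos.length := by
        intro e he
        rcases hkx with hk | ⟨x, hx, hxgt⟩
        · have : stopIdx pos k e ≤ e := stopIdx_le_of pos k e e (Or.inr (by omega))
          omega
        · obtain ⟨j, hj, hjx⟩ := List.getElem_of_mem hx
          have hjD : pos.getD j 0 = x := by
            rw [List.getD_eq_getElem pos 0 hj, hjx]
          have htar : pos.getD e 0 ≤ pos.getD (n.toNat - 1) 0 :=
            getD_mono pos n.toNat hm hs e (n.toNat - 1) (by omega) (by omega)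
          have : stopIdx pos k e ≤ j :=
            stopIdx_le_of pos k e j (Or.inr (by rw [hjD]; omega))
          omega
      have h0 : (0 : Int) = ((0 : Nat) : Int) := by norm_cast
      rw [h0]
      exact loop_eq pos n k hlen hs hstopall n.toNat 0 0 0 (by omega) (by omega) (by omega)
        (by intro e' _ _; omega)
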